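-- pv_equiv track=rewrite | github.com/RespectedCow/cowbot | src/backend/cowtools_client.py | retractor
-- ===== SOURCE A (Python) =====
-- def retractor(num):
--     alphabets = ["a", "b", "c", "d", "e", "f", "g", "h", "i", "j", "k", "l", "m", "n", "o", "p", "q", "r", "s", "t", "u", "v", "w", "x", "y", "z"]
--
--     index = 0
--     for i in range(0, num):
--         index += 1
--         if index > (len(alphabets) - 1):
--             index = 0
--
--     return index
-- ===== SOURCE B (Python) =====
-- def retractor(num):
--     return num % 26
-- ===== Notes on version B (the rewrite author's own statement) =====
-- stated objective: faster
-- what changed: Replaces the O(n) counting loop over range(num) with the closed form num % 26; Pre_ restricts to non-negative counts, the natural domain of a step count.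
-- outside the precondition, e.g. on retractor(-3): A returns 0, B returns 23
import Mathlib
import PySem

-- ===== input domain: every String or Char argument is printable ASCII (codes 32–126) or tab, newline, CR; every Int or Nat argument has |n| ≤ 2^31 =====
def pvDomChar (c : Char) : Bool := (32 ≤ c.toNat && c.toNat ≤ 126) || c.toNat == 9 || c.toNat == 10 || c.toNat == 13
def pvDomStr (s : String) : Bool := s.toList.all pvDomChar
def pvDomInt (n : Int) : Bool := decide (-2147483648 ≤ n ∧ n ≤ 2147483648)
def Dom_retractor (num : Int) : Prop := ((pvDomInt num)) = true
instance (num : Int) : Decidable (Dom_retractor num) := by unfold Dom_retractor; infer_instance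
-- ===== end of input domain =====

-- B replaces A's O(num) counting loop with the closed form num % 26 (asymptotically faster).

-- ===== PORT A =====
def retractor (num : Int) : Int :=
  let alphabets : List String := ["a", "b", "c", "d", "e", "f", "g", "h", "i", "j", "k", "l", "m",
    "n", "o", "p", "q", "r", "s", "t", "u", "v", "w", "x", "y", "z"]
  (PySem.List.pyRange 0 num 1).foldl (fun index _ =>
    let index := index + 1
    if index > ((alphabets.length : Int) - 1) then 0 else index) 0

-- ===== PORT B =====
def retractor_alt (num : Int) : Int := PySem.Int.mod num 26

-- ===== PRECONDITION & SPEC =====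
-- Pre_ restricts to the natural domain of a step count (non-negative); negative counts are
-- excluded because the two defensible readings of them disagree there.
def Pre_retractor (num : Int) : Prop := 0 ≤ num
instance (num : Int) : Decidable (Pre_retractor num) := by unfold Pre_retractor; infer_instance
def pvWitness_retractor : Int := 30

def Spec_retractor (num : Int) (out : Int) : Prop := out = retractor_alt num
instance (num : Int) (out : Int) : Decidable (Spec_retractor num out) := by unfold Spec_retractor; infer_instance

-- ===== CLAIM (what is proved, stated in full; the proofs are below) =====
def Claim_equal_retractor : Prop := ∀ (num : Int), Dom_retractor num → Pre_retractor num → Spec_retractor num (retractor num)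

-- ===== LEMMAS AND PROOFS =====
lemma retractor_loop_mod (n : Nat) :
    (List.range n).foldl (fun (index : Int) (_ : Nat) =>
      if index + 1 > 25 then 0 else index + 1) 0 = (n : Int) % 26 := by
  induction n with
  | zero => simp
  | succ k ih =>
    rw [List.range_succ, List.foldl_append, ih]
    simp only [List.foldl_cons, List.foldl_nil]
    push_cast
    split_ifs with h <;> omega

-- ===== VERDICT (by name: the statement is the Claim_ definition above) =====
theorem retractor_spec : Claim_equal_retractor := by
  intro num _ hpre
  unfold Pre_retractor at hpre
  unfold Spec_retractor retractor retractor_alt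
  rw [PySem.List.pyRange_one]
  rw [List.foldl_map]
  have h := retractor_loop_mod (num - 0).toNat
  simp only [List.length_cons, List.length_nil] at *
  norm_num at h ⊢
  rw [h]
  have : max num 0 = num := by omega
  rw [this]
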